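-- pv_equiv track=rewrite | github.com/diesel2020/FinalDoseApp | compute.py | full_dose
-- ===== SOURCE A (Python) =====
-- def full_dose(q, result2, output2):
--     new_list = []
--     counter = 1
--     for j in q:
--         for drop in range(result2):
--             if counter > output2:
--                 break
--             new_list.append(j)
--             counter += 1
--     return new_list
-- ===== SOURCE B (Python) =====
-- def full_dose(q, result2, output2):
--     if result2 <= 0 or output2 <= 0:
--         return []
--     total = min(len(q) * result2, output2)
--     return [q[i // result2] for i in range(total)]
-- ===== Notes on version B (the rewrite author's own statement) =====
-- stated objective: alternative
-- what changed: replaces A's nested loop with per-append counter by a closed-form total length min(len(q)*result2, output2) and a single comprehension over output indices, reading q[i // result2] for each output position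
import Mathlib
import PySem

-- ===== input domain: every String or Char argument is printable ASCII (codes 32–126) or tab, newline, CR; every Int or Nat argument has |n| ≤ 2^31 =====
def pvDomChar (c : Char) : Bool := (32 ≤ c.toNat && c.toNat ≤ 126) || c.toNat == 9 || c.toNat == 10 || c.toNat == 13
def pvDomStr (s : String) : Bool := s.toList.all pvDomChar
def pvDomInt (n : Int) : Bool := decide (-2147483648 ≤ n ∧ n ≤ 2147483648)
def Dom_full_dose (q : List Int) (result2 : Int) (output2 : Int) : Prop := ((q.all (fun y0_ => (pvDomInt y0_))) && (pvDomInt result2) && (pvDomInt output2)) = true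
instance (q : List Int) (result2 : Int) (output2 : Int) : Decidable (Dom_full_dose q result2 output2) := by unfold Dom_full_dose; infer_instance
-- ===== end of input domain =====

-- B replaces A's nested loop with running counter by a closed-form output length
-- min(len(q)*result2, output2) and a single pass over OUTPUT indices, reading q[i // result2];
-- same return value on every input.

-- ===== PORT A =====
-- inner 'for drop in range(result2): if counter > output2: break; append; counter += 1';
-- ported as recursion on the iteration count
def fullDoseInner (j : Int) (output2 : Int) : Nat → List Int × Int → List Int × Int
  | 0, st => st
  | n + 1, (acc, counter) =>
      if counter > output2 then (acc, counter)
      else fullDoseInner j output2 n (acc ++ [j], counter + 1)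

def full_dose (q : List Int) (result2 : Int) (output2 : Int) : List Int :=
  (q.foldl (fun st j => fullDoseInner j output2 result2.toNat st)
    (([] : List Int), (1 : Int))).1

-- ===== PORT B =====
-- the comprehension '[q[i // result2] for i in range(total)]'; the index i // result2 is
-- always < len(q) (since i < total ≤ len(q)*result2 and result2 > 0 on this branch),
-- so Python never raises here and plain getD is exact
def full_dose_alt (q : List Int) (result2 : Int) (output2 : Int) : List Int :=
  if result2 ≤ 0 ∨ output2 ≤ 0 then []
  else
    let total : Int := min ((q.length : Int) * result2) output2
    (List.range total.toNat).map (fun i => q.getD (i / result2.toNat) 0)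

-- ===== PRECONDITION & SPEC =====
def Spec_full_dose (q : List Int) (result2 : Int) (output2 : Int) (out : List Int) : Prop := out = full_dose_alt q result2 output2
instance (q : List Int) (result2 : Int) (output2 : Int) (out : List Int) : Decidable (Spec_full_dose q result2 output2 out) := by unfold Spec_full_dose; infer_instance

-- ===== CLAIM (what is proved, stated in full; the proofs are below) =====
def Claim_equal_full_dose : Prop := ∀ (q : List Int) (result2 : Int) (output2 : Int), Dom_full_dose q result2 output2 → Spec_full_dose q result2 output2 (full_dose q result2 output2)

-- ===== LEMMAS AND PROOFS =====

-- B's comprehension body, parametrised by the output length n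
def mapB (q : List Int) (r n : Nat) : List Int :=
  (List.range n).map (fun i => q.getD (i / r) 0)

theorem mapB_cons (j : Int) (rest : List Int) (r n : Nat) (hr : 0 < r) :
    mapB (j :: rest) r n = List.replicate (min r n) j ++ mapB rest r (n - r) := by
  rcases Nat.le_total n r with h | h
  · have hn : n - r = 0 := by omega
    have hmin : min r n = n := by omega
    rw [hn, hmin]
    simp only [mapB, List.range_zero, List.map_nil, List.append_nil]
    rw [List.eq_replicate_iff]
    constructor
    · simp
    · intro x hx
      simp only [List.mem_map, List.mem_range] at hx
      obtain ⟨i, hi, rfl⟩ := hx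
      have : i / r = 0 := Nat.div_eq_of_lt (by omega)
      simp [this]
  · have hmin : min r n = r := by omega
    have hsplit : n = r + (n - r) := by omega
    rw [hmin, mapB, hsplit, List.range_add, List.map_append]
    congr 1
    · rw [List.eq_replicate_iff]
      constructor
      · simp
      · intro x hx
        simp only [List.mem_map, List.mem_range] at hx
        obtain ⟨i, hi, rfl⟩ := hx
        have : i / r = 0 := Nat.div_eq_of_lt hi
        simp [this]
    · rw [mapB, List.map_map, Nat.add_sub_cancel_left]
      apply List.map_congr_left
      intro i _
      simp only [Function.comp_apply]
      have : (r + i) / r = i / r + 1 := by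
        rw [Nat.add_comm, Nat.add_div_right _ hr]
      rw [this, List.getD_cons_succ]

-- A's inner loop appends min(result2, remaining budget) copies and advances the counter
theorem fullDoseInner_eq (j output2 : Int) (n : Nat) (acc : List Int) (c : Int) :
    fullDoseInner j output2 n (acc, c) =
      (acc ++ List.replicate (min n (output2 + 1 - c).toNat) j,
       c + min n (output2 + 1 - c).toNat) := by
  induction n generalizing acc c with
  | zero => simp [fullDoseInner]
  | succ rest ih =>
      simp only [fullDoseInner]
      by_cases h : c > output2
      · have h0 : (output2 + 1 - c).toNat = 0 := by omega
        simp [h, h0]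
      · simp only [if_neg h, ih]
        have hmin : min (rest + 1) (output2 + 1 - c).toNat
            = min rest (output2 + 1 - (c + 1)).toNat + 1 := by omega
        rw [hmin, List.replicate_succ]
        simp only [Prod.mk.injEq]
        exact ⟨by simp, by push_cast; omega⟩

-- A's outer loop produces exactly B's index-built list of the remaining budget
theorem fullDose_loop_eq (result2 output2 : Int) (hres : 0 < result2)
    (q : List Int) (acc : List Int) (c : Int) :
    (q.foldl (fun st j => fullDoseInner j output2 result2.toNat st)
      (acc, c)).1
    = acc ++ mapB q result2.toNat (min (q.length * result2.toNat) (output2 + 1 - c).toNat) := by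
  induction q generalizing acc c with
  | nil => simp [mapB]
  | cons j rest ih =>
      have hrt : 0 < result2.toNat := by omega
      simp only [List.foldl_cons, fullDoseInner_eq, ih]
      set rt := result2.toNat with hrtdef
      set bt := (output2 + 1 - c).toNat with hbt
      have harg : (output2 + 1 - (c + ↑(min rt bt))).toNat = bt - min rt bt := by omega
      rw [harg, List.append_assoc]
      congr 1
      rw [mapB_cons j rest rt _ hrt]
      have hm : (rest.length + 1) * rt = rest.length * rt + rt := Nat.succ_mul _ _
      have h1 : min rt (min ((j :: rest).length * rt) bt) = min rt bt := by
        simp only [List.length_cons]; omega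
      have h2 : min ((j :: rest).length * rt) bt - rt
          = min (rest.length * rt) (bt - min rt bt) := by
        simp only [List.length_cons]; omega
      rw [h1, h2]

-- ===== VERDICT (by name: the statement is the Claim_ definition above) =====
theorem full_dose_spec : Claim_equal_full_dose := by
  intro q result2 output2 _
  unfold Spec_full_dose full_dose full_dose_alt
  by_cases hr : result2 ≤ 0
  · have hemp : result2.toNat = 0 := by omega
    have : ∀ (l : List Int) (st : List Int × Int),
        l.foldl (fun st j => fullDoseInner j output2 result2.toNat st) st = st := by
      intro l
      induction l with
      | nil => intro st; rfl
      | cons x rest ih =>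
          intro st
          rw [List.foldl_cons]
          have hst : fullDoseInner x output2 result2.toNat st = st := by
            rw [hemp]; obtain ⟨a, b⟩ := st; rfl
          rw [hst]; exact ih st
    rw [this, if_pos (Or.inl hr)]
  · rw [fullDose_loop_eq result2 output2 (by omega) q [] 1]
    by_cases ho : output2 ≤ 0
    · rw [if_pos (Or.inr ho)]
      have h0 : (output2 + 1 - 1).toNat = 0 := by omega
      rw [h0, Nat.min_zero]
      simp [mapB]
    · rw [if_neg (by omega)]
      simp only [List.nil_append, mapB]
      congr 1
      have h1 : (min ((q.length : Int) * result2) output2).toNat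
          = min ((q.length : Int) * result2).toNat output2.toNat := by
        omega
      have h2 : ((q.length : Int) * result2).toNat = q.length * result2.toNat := by
        have : ((q.length : Int) * result2) = ((q.length * result2.toNat : Nat) : Int) := by
          push_cast; rw [Int.toNat_of_nonneg (by omega)]
        omega
      have h3 : (output2 + 1 - 1).toNat = output2.toNat := by omega
      rw [h1, h2, h3]
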